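-- pv_equiv track=rewrite | github.com/nfahmad/EECS210 | Assignment5/EECS210_Assignment5.py | determineInjective
-- ===== SOURCE A (Python) =====
-- def determineInjective(f):
--     possibleValues = set()
--     #Iterate through every pair in the relation
--     for pair in f:
--         value1, value2 = pair
--         #Check if the second element is already a possible value
--         if value2 in possibleValues:
--             return False
--         #Add that second element to the set of possible values
--         possibleValues.add(value2)
--     #If every second element is unique, it is injective
--     return True
-- ===== SOURCE B (Python) =====
-- def determineInjective(f):
--     seconds = sorted(v2 for v1, v2 in f)
--     return all(a != b for a, b in zip(seconds, seconds[1:]))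
-- ===== Notes on version B (the rewrite author's own statement) =====
-- stated objective: alternative
-- what changed: Replaces A's one-pass hash-set membership loop with a sort-then-scan: sort the second components and check that no two adjacent sorted values are equal; no set is used at all.
import Mathlib
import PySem

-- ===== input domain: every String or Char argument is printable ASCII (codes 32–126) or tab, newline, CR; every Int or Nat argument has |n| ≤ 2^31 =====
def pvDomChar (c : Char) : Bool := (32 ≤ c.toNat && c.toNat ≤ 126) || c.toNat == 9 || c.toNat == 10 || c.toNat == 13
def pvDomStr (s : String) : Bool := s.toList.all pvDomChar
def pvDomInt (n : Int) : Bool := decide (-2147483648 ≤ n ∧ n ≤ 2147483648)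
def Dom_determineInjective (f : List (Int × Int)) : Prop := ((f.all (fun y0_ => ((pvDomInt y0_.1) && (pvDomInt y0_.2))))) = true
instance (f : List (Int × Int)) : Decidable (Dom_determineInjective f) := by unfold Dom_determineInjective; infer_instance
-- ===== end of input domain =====

-- B replaces A's incremental hash-set membership loop by sort-then-scan: sort the second
-- components and check that no two adjacent sorted values are equal (objective: alternative).

-- ===== PORT A =====
-- the for-loop of A: early return False on a repeated second element, else accumulate into the set
def detLoopA : List (Int × Int) → PySem.Set Int → Bool
  | [], _ => true
  | pair :: rest, possibleValues =>
    let value2 := pair.2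
    if PySem.Set.contains possibleValues value2 then false
    else detLoopA rest (PySem.Set.add possibleValues value2)

def determineInjective (f : List (Int × Int)) : Bool :=
  detLoopA f PySem.Set.empty

-- ===== PORT B =====
def determineInjective_alt (f : List (Int × Int)) : Bool :=
  let seconds := PySem.List.sorted (f.map (fun p => p.2)) (fun x => x) false
  (seconds.zip (PySem.List.slice seconds (some 1) none)).all (fun ab => ab.1 != ab.2)

-- ===== PRECONDITION & SPEC =====
def Spec_determineInjective (f : List (Int × Int)) (out : Bool) : Prop := out = determineInjective_alt f
instance (f : List (Int × Int)) (out : Bool) : Decidable (Spec_determineInjective f out) := by unfold Spec_determineInjective; infer_instance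

-- ===== CLAIM (what is proved, stated in full; the proofs are below) =====
def Claim_equal_determineInjective : Prop := ∀ (f : List (Int × Int)), Dom_determineInjective f → Spec_determineInjective f (determineInjective f)

-- ===== LEMMAS AND PROOFS =====

-- A's loop returns true iff the pending second components are fresh and pairwise distinct
theorem detLoopA_true_iff (l : List (Int × Int)) (s : PySem.Set Int) :
    detLoopA l s = true ↔ (l.map (fun p => p.2)).Nodup ∧ ∀ x ∈ l.map (fun p => p.2), x ∉ s := by
  induction l generalizing s with
  | nil => simp [detLoopA]
  | cons p rest ih =>
    show (if PySem.Set.contains s p.2 then false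
          else detLoopA rest (PySem.Set.add s p.2)) = true ↔ _
    by_cases hc : PySem.Set.contains s p.2
    · rw [if_pos hc]
      simp only [PySem.Set.contains, List.contains_iff_mem] at hc
      simp [hc]
    · rw [if_neg hc, ih]
      simp only [PySem.Set.contains, List.contains_iff_mem] at hc
      constructor
      · rintro ⟨hnd, hfresh⟩
        refine ⟨?_, ?_⟩
        · simp only [List.map_cons, List.nodup_cons]
          exact ⟨fun hmem => ((hfresh p.2 hmem).elim ((PySem.Set.mem_add s p.2 p.2).mpr (Or.inr rfl))), hnd⟩
        · intro x hx
          simp only [List.map_cons, List.mem_cons] at hx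
          rcases hx with rfl | hx
          · exact hc
          · exact fun hxs => hfresh x hx ((PySem.Set.mem_add s p.2 x).mpr (Or.inl hxs))
      · rintro ⟨hnd, hfresh⟩
        simp only [List.map_cons, List.nodup_cons] at hnd
        refine ⟨hnd.2, fun x hx hxadd => ?_⟩
        rcases (PySem.Set.mem_add s p.2 x).mp hxadd with hxs | rfl
        · exact hfresh x (by simp [hx]) hxs
        · exact hnd.1 hx

-- B's adjacent-pairs scan is the IsChain (· ≠ ·) predicate
theorem zipAll_ne_iff (l : List Int) :
    ((l.zip l.tail).all (fun ab => ab.1 != ab.2) = true) ↔ l.IsChain (· ≠ ·) := by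
  induction l with
  | nil => simp
  | cons a t ih =>
    cases t with
    | nil => simp
    | cons b u =>
      simp only [List.tail_cons, List.zip_cons_cons, List.all_cons, Bool.and_eq_true,
        bne_iff_ne, List.isChain_cons_cons]
      exact and_congr Iff.rfl ih

-- on a ≤-pairwise list, adjacent distinctness is exactly Nodup
theorem isChain_ne_iff_nodup_of_pairwise_le (l : List Int) (hle : l.Pairwise (· ≤ ·)) :
    l.IsChain (· ≠ ·) ↔ l.Nodup := by
  constructor
  · intro hch
    have hlt : l.Pairwise (· < ·) := by
      rw [← List.isChain_iff_pairwise]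
      have hch_le : l.IsChain (· ≤ ·) := hle.isChain
      clear hle
      induction l with
      | nil => simp
      | cons a t ih =>
        cases t with
        | nil => simp
        | cons b u =>
          rw [List.isChain_cons_cons] at hch hch_le ⊢
          exact ⟨lt_of_le_of_ne hch_le.1 hch.1, ih hch.2 hch_le.2⟩
    exact hlt.imp ne_of_lt
  · intro hnd
    exact List.Pairwise.isChain hnd

-- ===== VERDICT (by name: the statement is the Claim_ definition above) =====
theorem determineInjective_spec : Claim_equal_determineInjective := by
  intro f _
  unfold Spec_determineInjective determineInjective
  show detLoopA f PySem.Set.empty =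
    ((PySem.List.sorted (f.map (fun p => p.2)) (fun x => x) false).zip
      (PySem.List.slice (PySem.List.sorted (f.map (fun p => p.2)) (fun x => x) false) (some 1) none)).all
      (fun ab => ab.1 != ab.2)
  rw [PySem.List.slice_from_one]
  rw [Bool.eq_iff_iff, detLoopA_true_iff, zipAll_ne_iff,
    isChain_ne_iff_nodup_of_pairwise_le _ (PySem.List.sorted_pairwise _ _),
    (PySem.List.sorted_perm (f.map (fun p => p.2)) (fun x => x) false).nodup_iff]
  simp [PySem.Set.empty]
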